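-- pv_equiv track=rewrite | github.com/lol157/new_olimp_test | load_database.py | reformat_windows
-- ===== SOURCE A (Python) =====
-- def reformat_windows(windows, windows_for_room):
--     new_windows = []
--     c = 1
--     for floor_num, bool_lst in windows.items():
--         dct = {}
--         last_index = 0
--         for i in windows_for_room:
--             dct[c] = bool_lst[last_index:last_index + i]
--             c += 1
--             last_index += i
--         new_windows.append(dct)
--     return new_windows
-- ===== SOURCE B (Python) =====
-- def reformat_windows(windows, windows_for_room):
--     # Room-major transposition: build per-floor rows of slices column by column,
--     # then turn each row into a dict with consecutive keys via dict(enumerate(...)).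
--     floors = list(windows.values())
--     rows = [[] for _ in floors]
--     start = 0
--     for i in windows_for_room:
--         for row, bl in zip(rows, floors):
--             row.append(bl[start:start + i])
--         start += i
--     n = len(windows_for_room)
--     return [dict(enumerate(row, f * n + 1)) for f, row in enumerate(rows)]
-- ===== Notes on version B (the rewrite author's own statement) =====
-- stated objective: alternative
-- what changed: B traverses room-major instead of floor-major: it transposes the problem, appending each room's slice column to every floor's row in one pass over windows_for_room, then converts each accumulated row to a dict with dict(enumerate(row, f*n+1)); A's nested floor-major loops with a global running counter and running offset are gone.
import Mathlib
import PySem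

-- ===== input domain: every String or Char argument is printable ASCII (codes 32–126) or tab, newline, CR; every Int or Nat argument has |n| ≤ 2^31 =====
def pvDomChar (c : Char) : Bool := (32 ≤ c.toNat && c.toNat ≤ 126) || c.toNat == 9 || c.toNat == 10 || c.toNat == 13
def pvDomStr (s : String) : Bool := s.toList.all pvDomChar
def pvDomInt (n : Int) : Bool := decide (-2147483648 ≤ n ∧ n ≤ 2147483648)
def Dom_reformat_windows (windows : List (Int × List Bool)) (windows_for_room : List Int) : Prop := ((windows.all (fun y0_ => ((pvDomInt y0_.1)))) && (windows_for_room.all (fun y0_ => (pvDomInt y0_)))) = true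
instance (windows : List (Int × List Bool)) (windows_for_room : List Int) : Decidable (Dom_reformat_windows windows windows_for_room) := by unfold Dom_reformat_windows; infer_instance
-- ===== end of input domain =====

-- B traverses room-major (one pass over windows_for_room appending each room's slice
-- to every floor's row, then dict(enumerate(row, f*n+1)) per floor) instead of A's
-- floor-major nested loops with a global counter (objective: alternative decomposition).

-- ===== PORT A =====
def reformat_windows (windows : List (Int × List Bool)) (windows_for_room : List Int) : List (List (Int × List Bool)) :=
  -- outer state: (new_windows, c); inner state: (dct, c, last_index)
  (windows.foldl
    (fun (st : List (List (Int × List Bool)) × Int) (p : Int × List Bool) =>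
      let inner := windows_for_room.foldl
        (fun (s : PySem.Dict Int (List Bool) × Int × Int) (i : Int) =>
          (s.1.insert s.2.1 (PySem.List.slice p.2 (some s.2.2) (some (s.2.2 + i))),
           s.2.1 + 1, s.2.2 + i))
        (PySem.Dict.empty, st.2, 0)
      (st.1 ++ [inner.1.items], inner.2.1))
    ([], 1)).1

-- ===== PORT B =====
def reformat_windows_alt (windows : List (Int × List Bool)) (windows_for_room : List Int) : List (List (Int × List Bool)) :=
  let floors := windows.map (·.2)
  -- one pass over windows_for_room: append this room's slice to every floor's row
  let rows := (windows_for_room.foldl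
    (fun (st : List (List (List Bool)) × Int) (i : Int) =>
      ((st.1.zip floors).map (fun p => p.1 ++ [PySem.List.slice p.2 (some st.2) (some (st.2 + i))]),
       st.2 + i))
    (floors.map (fun _ => ([] : List (List Bool))), 0)).1
  let n : Int := windows_for_room.length
  (PySem.List.enumerate rows).map (fun fr =>
    ((PySem.List.enumerate fr.2 (fr.1 * n + 1)).foldl
      (fun (d : PySem.Dict Int (List Bool)) kv => d.insert kv.1 kv.2)
      PySem.Dict.empty).items)

-- ===== PRECONDITION & SPEC =====
def Spec_reformat_windows (windows : List (Int × List Bool)) (windows_for_room : List Int) (out : List (List (Int × List Bool))) : Prop := out = reformat_windows_alt windows windows_for_room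
instance (windows : List (Int × List Bool)) (windows_for_room : List Int) (out : List (List (Int × List Bool))) : Decidable (Spec_reformat_windows windows windows_for_room out) := by unfold Spec_reformat_windows; infer_instance

-- ===== CLAIM (what is proved, stated in full; the proofs are below) =====
def Claim_equal_reformat_windows : Prop := ∀ (windows : List (Int × List Bool)) (windows_for_room : List Int), Dom_reformat_windows windows windows_for_room → Spec_reformat_windows windows windows_for_room (reformat_windows windows windows_for_room)

-- ===== LEMMAS AND PROOFS =====

-- Closed form of one floor's items: room slices with consecutive keys from c.
def pvSpecFloor (bl : List Bool) (wfr : List Int) (c li : Int) : List (Int × List Bool) :=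
  match wfr with
  | [] => []
  | i :: rest => (c, PySem.List.slice bl (some li) (some (li + i))) :: pvSpecFloor bl rest (c + 1) (li + i)

def pvSpecFloors (ws : List (Int × List Bool)) (wfr : List Int) (c : Int) : List (List (Int × List Bool)) :=
  match ws with
  | [] => []
  | p :: rest => pvSpecFloor p.2 wfr c 0 :: pvSpecFloors rest wfr (c + wfr.length)

-- A's inner loop, generalized over the accumulator (keys of d all below c, so every insert is fresh).
theorem pvA_inner (bl : List Bool) : ∀ (wfr : List Int) (d : PySem.Dict Int (List Bool)) (c li : Int),
    (∀ k ∈ d.keys, k < c) →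
    (wfr.foldl
      (fun (s : PySem.Dict Int (List Bool) × Int × Int) (i : Int) =>
        (s.1.insert s.2.1 (PySem.List.slice bl (some s.2.2) (some (s.2.2 + i))),
         s.2.1 + 1, s.2.2 + i)) (d, c, li)).1.items
        = d.items ++ pvSpecFloor bl wfr c li
    ∧ (wfr.foldl
      (fun (s : PySem.Dict Int (List Bool) × Int × Int) (i : Int) =>
        (s.1.insert s.2.1 (PySem.List.slice bl (some s.2.2) (some (s.2.2 + i))),
         s.2.1 + 1, s.2.2 + i)) (d, c, li)).2.1 = c + wfr.length := by
  intro wfr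
  induction wfr with
  | nil => intro d c li _; simp [pvSpecFloor]
  | cons i rest ih =>
    intro d c li hlt
    have hnc : d.contains c = false := by
      cases hb : d.contains c with
      | false => rfl
      | true =>
        have := hlt c ((PySem.Dict.contains_iff_mem_keys d c).mp hb)
        omega
    have hkeys : ∀ k ∈ (d.insert c (PySem.List.slice bl (some li) (some (li + i)))).keys, k < c + 1 := by
      intro k hk
      rcases (PySem.Dict.mem_keys_insert d c k _).mp hk with h | h
      · omega
      · have := hlt k h; omega
    have h := ih (d.insert c (PySem.List.slice bl (some li) (some (li + i)))) (c + 1) (li + i) hkeys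
    simp only [List.foldl_cons]
    constructor
    · rw [h.1, PySem.Dict.items_insert_of_not_contains d _ hnc]
      simp [pvSpecFloor]
    · rw [h.2]; simp [List.length_cons]; omega

-- A's outer loop equals the closed form.
theorem pvA_outer (wfr : List Int) : ∀ (ws : List (Int × List Bool)) (acc : List (List (Int × List Bool))) (c : Int),
    (ws.foldl
      (fun (st : List (List (Int × List Bool)) × Int) (p : Int × List Bool) =>
        let inner := wfr.foldl
          (fun (s : PySem.Dict Int (List Bool) × Int × Int) (i : Int) =>
            (s.1.insert s.2.1 (PySem.List.slice p.2 (some s.2.2) (some (s.2.2 + i))),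
             s.2.1 + 1, s.2.2 + i))
          (PySem.Dict.empty, st.2, 0)
        (st.1 ++ [inner.1.items], inner.2.1)) (acc, c)).1
      = acc ++ pvSpecFloors ws wfr c := by
  intro ws
  induction ws with
  | nil => intro acc c; simp [pvSpecFloors]
  | cons p rest ih =>
    intro acc c
    have h := pvA_inner p.2 wfr PySem.Dict.empty c 0 (by simp [PySem.Dict.keys_empty])
    simp only [List.foldl_cons]
    rw [show (PySem.Dict.empty : PySem.Dict Int (List Bool)).items = [] from rfl] at h
    simp only [h.1, h.2, List.nil_append]
    rw [ih]
    simp [pvSpecFloors]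

-- B-side closed form: the row a single floor accumulates (its slices in room order).
def pvRow (bl : List Bool) (wfr : List Int) (li : Int) : List (List Bool) :=
  match wfr with
  | [] => []
  | i :: rest => PySem.List.slice bl (some li) (some (li + i)) :: pvRow bl rest (li + i)

-- zipping a mapped list with its source pairs each element with its image
theorem pvZip_map_self {α β : Type} (g : α → β) : ∀ (l : List α),
    (l.map g).zip l = l.map (fun x => (g x, x)) := by
  intro l
  induction l with
  | nil => rfl
  | cons x t ih => simp only [List.map_cons, List.zip_cons_cons, ih]

-- B's single pass over windows_for_room builds every floor's row simultaneously.
theorem pvB_rows (floors : List (List Bool)) : ∀ (wfr : List Int) (g : List Bool → List (List Bool)) (li : Int),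
    (wfr.foldl
      (fun (st : List (List (List Bool)) × Int) (i : Int) =>
        ((st.1.zip floors).map (fun p => p.1 ++ [PySem.List.slice p.2 (some st.2) (some (st.2 + i))]),
         st.2 + i))
      (floors.map g, li)).1
      = floors.map (fun bl => g bl ++ pvRow bl wfr li) := by
  intro wfr
  induction wfr with
  | nil => intro g li; simp [pvRow]
  | cons i rest ih =>
    intro g li
    simp only [List.foldl_cons]
    rw [pvZip_map_self g floors, List.map_map]
    have h := ih (fun x => g x ++ [PySem.List.slice x (some li) (some (li + i))]) (li + i)
    simp only [Function.comp_def] at h ⊢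
    rw [h]
    apply List.map_congr_left
    intro bl _
    simp [pvRow, List.append_assoc]

-- enumerating a row from c is exactly the per-floor closed form.
theorem pvEnum_row (bl : List Bool) : ∀ (wfr : List Int) (li c : Int),
    PySem.List.enumerate (pvRow bl wfr li) c = pvSpecFloor bl wfr c li := by
  intro wfr
  induction wfr with
  | nil => intro li c; simp [pvRow, pvSpecFloor, PySem.List.enumerate_nil]
  | cons i rest ih => intro li c; simp [pvRow, pvSpecFloor, PySem.List.enumerate_cons, ih]

-- dict(pairs) for pairs with distinct keys: items come back unchanged.
theorem pvDict_of_pairs (l : List (Int × List Bool)) (hnd : (l.map (·.1)).Nodup) :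
    ((l.foldl (fun (d : PySem.Dict Int (List Bool)) kv => d.insert kv.1 kv.2) PySem.Dict.empty).items) = l := by
  have h := PySem.Dict.items_foldl_insert_fresh (d := (PySem.Dict.empty : PySem.Dict Int (List Bool)))
      (l := l) (k := (·.1)) (v := (·.2)) (by intro a _; simp [PySem.Dict.contains_empty]) hnd
  simpa using h

-- B's outer pass over enumerated rows equals the closed form.
theorem pvB_outer (wfr : List Int) : ∀ (ws : List (Int × List Bool)) (s : Int),
    (PySem.List.enumerate ((ws.map (·.2)).map (fun bl => pvRow bl wfr 0)) s).map (fun fr =>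
      ((PySem.List.enumerate fr.2 (fr.1 * (wfr.length : Int) + 1)).foldl
        (fun (d : PySem.Dict Int (List Bool)) kv => d.insert kv.1 kv.2)
        PySem.Dict.empty).items)
      = pvSpecFloors ws wfr (s * (wfr.length : Int) + 1) := by
  intro ws
  induction ws with
  | nil => intro s; simp [pvSpecFloors, PySem.List.enumerate_nil]
  | cons p rest ih =>
    intro s
    simp only [List.map_cons, PySem.List.enumerate_cons, pvSpecFloors]
    have hnd : ((PySem.List.enumerate (pvRow p.2 wfr 0) (s * (wfr.length : Int) + 1)).map (·.1)).Nodup := by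
      rw [PySem.List.map_fst_enumerate]
      exact PySem.List.nodup_pyRange_one _ _
    rw [pvDict_of_pairs _ hnd, pvEnum_row, ih (s + 1)]
    have harith : (s + 1) * (wfr.length : Int) + 1 = s * (wfr.length : Int) + 1 + (wfr.length : Int) := by ring
    rw [harith]

-- ===== VERDICT (by name: the statement is the Claim_ definition above) =====
theorem reformat_windows_spec : Claim_equal_reformat_windows := by
  intro windows wfr _
  unfold Spec_reformat_windows
  show reformat_windows windows wfr = reformat_windows_alt windows wfr
  have hA : reformat_windows windows wfr = pvSpecFloors windows wfr 1 := by
    unfold reformat_windows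
    rw [pvA_outer wfr windows [] 1, List.nil_append]
  have hB : reformat_windows_alt windows wfr = pvSpecFloors windows wfr 1 := by
    unfold reformat_windows_alt
    simp only
    rw [pvB_rows (windows.map (·.2)) wfr (fun _ => []) 0]
    simp only [List.nil_append]
    have := pvB_outer wfr windows 0
    simpa using this
  rw [hA, hB]
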